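-- pv_equiv track=rewrite | github.com/gianlucamazza/website_ai-knowledge | scripts/markdown_quality_fixer.py | _fix_code_block_spacing
-- ===== SOURCE A (Python) =====
-- def _fix_code_block_spacing(content: str) -> str:
--     """Fix MD031: Code blocks should be surrounded by blank lines."""
--     lines = content.split('\n')
--     fixed_lines = []
--     in_code_block = False
--
--     for i, line in enumerate(lines):
--         if line.startswith('```'):
--             if not in_code_block:
--                 # Starting code block
--                 if i > 0 and fixed_lines and fixed_lines[-1].strip():
--                     fixed_lines.append('')
--                 in_code_block = True
--             else:
--                 # Ending code block
--                 in_code_block = False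
--                 fixed_lines.append(line)
--                 if i + 1 < len(lines) and lines[i + 1].strip():
--                     fixed_lines.append('')
--                 continue
--
--         fixed_lines.append(line)
--
--     return '\n'.join(fixed_lines)
-- ===== SOURCE B (Python) =====
-- def _fix_code_block_spacing(content: str) -> str:
--     """Fix MD031 (blank lines around code fences): classify-then-emit two-pass rewrite."""
--     lines = content.split('\n')
--     # pass 1: mark each fence line as opening or closing by toggling a parity flag
--     roles = []
--     open_fence = True
--     for line in lines:
--         if line.startswith('```'):
--             roles.append('open' if open_fence else 'close')
--             open_fence = not open_fence
--         else:
--             roles.append(None)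
--     # pass 2: emit lines, adding blanks based on the output tail / next source line
--     out = []
--     for i, (line, role) in enumerate(zip(lines, roles)):
--         if role == 'open':
--             if out and out[-1].strip():
--                 out.append('')
--             out.append(line)
--         elif role == 'close':
--             out.append(line)
--             if i + 1 < len(lines) and lines[i + 1].strip():
--                 out.append('')
--         else:
--             out.append(line)
--     return '\n'.join(out)
-- ===== Notes on version B (the rewrite author's own statement) =====
-- stated objective: alternative
-- what changed: A's single loop with a mutable in_code_block flag is replaced by a two-pass decomposition: a first pass classifies each fence line as opening/closing by toggling a parity flag, a second pass emits lines and inserts blanks, deciding blank-before from the emitted output's tail and blank-after from the next source line.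
import Mathlib
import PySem

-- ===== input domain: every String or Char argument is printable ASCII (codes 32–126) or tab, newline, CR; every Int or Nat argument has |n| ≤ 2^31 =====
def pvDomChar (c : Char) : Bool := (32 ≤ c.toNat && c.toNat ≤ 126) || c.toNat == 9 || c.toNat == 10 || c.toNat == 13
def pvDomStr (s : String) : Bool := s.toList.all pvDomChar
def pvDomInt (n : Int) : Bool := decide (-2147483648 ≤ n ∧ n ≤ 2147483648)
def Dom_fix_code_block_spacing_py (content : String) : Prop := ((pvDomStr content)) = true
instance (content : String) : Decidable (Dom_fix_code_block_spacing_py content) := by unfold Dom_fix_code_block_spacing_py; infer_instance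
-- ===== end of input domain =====

-- B replaces A's single stateful loop by a classify-then-emit two-pass decomposition (objective: alternative; same cost).

-- ===== PORT A =====
-- Python's 'i + 1 < len(lines) and lines[i + 1].strip()' over the remaining lines
def nextNonblankA (rest : List String) : Bool :=
  match rest with
  | [] => false
  | nxt :: _ => PySem.Str.strip nxt != ""

-- A's loop state: index i, the remaining lines (for the lines[i+1] lookahead), the output so far, the in_code_block flag.
def fixLoopA : Nat → List String → List String → Bool → List String
  | _, [], acc, _ => acc
  | i, line :: rest, acc, inCode =>
    if PySem.Str.startswith line "```" then
      if !inCode then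
        -- starting code block
        let acc' := if 0 < i ∧ acc ≠ [] ∧ PySem.Str.strip (acc.getLastD "") ≠ "" then acc ++ [""] else acc
        fixLoopA (i + 1) rest (acc' ++ [line]) true
      else
        -- ending code block ('continue' after the optional blank)
        let acc' := acc ++ [line]
        let acc'' := if nextNonblankA rest then acc' ++ [""] else acc'
        fixLoopA (i + 1) rest acc'' false
    else
      fixLoopA (i + 1) rest (acc ++ [line]) inCode

def fix_code_block_spacing_py (content : String) : String :=
  PySem.Str.join "\n" (fixLoopA 0 ((PySem.Str.split? content "\n").getD []) [] false)

-- ===== PORT B =====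
inductive FenceRole | fopen | fclose | plain
deriving DecidableEq, Repr

-- pass 1: classify each fence line as opening or closing by toggling a parity flag
def classifyB : List String → Bool → List FenceRole
  | [], _ => []
  | line :: rest, openFence =>
    if PySem.Str.startswith line "```" then
      (if openFence then FenceRole.fopen else FenceRole.fclose) :: classifyB rest (!openFence)
    else
      FenceRole.plain :: classifyB rest openFence

-- Python's 'i + 1 < len(lines) and lines[i + 1].strip()' over the remaining classified lines
def nextNonblankB (rest : List (String × FenceRole)) : Bool :=
  match rest with
  | [] => false
  | (nxt, _) :: _ => PySem.Str.strip nxt != ""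

-- pass 2: emit lines; the blank-before decision looks at the emitted tail, the blank-after at the next source line
def emitB : List (String × FenceRole) → List String → List String
  | [], out => out
  | (line, FenceRole.fopen) :: rest, out =>
    let out' := if out ≠ [] ∧ PySem.Str.strip (out.getLastD "") ≠ "" then out ++ [""] else out
    emitB rest (out' ++ [line])
  | (line, FenceRole.fclose) :: rest, out =>
    let out' := out ++ [line]
    let out'' := if nextNonblankB rest then out' ++ [""] else out'
    emitB rest out''
  | (line, FenceRole.plain) :: rest, out => emitB rest (out ++ [line])

def fix_code_block_spacing_py_alt (content : String) : String :=
  PySem.Str.join "\n"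
    (emitB (((PySem.Str.split? content "\n").getD []).zip
            (classifyB ((PySem.Str.split? content "\n").getD []) true)) [])

-- ===== PRECONDITION & SPEC =====
def Spec_fix_code_block_spacing_py (content : String) (out : String) : Prop := out = fix_code_block_spacing_py_alt content
instance (content : String) (out : String) : Decidable (Spec_fix_code_block_spacing_py content out) := by unfold Spec_fix_code_block_spacing_py; infer_instance

-- ===== CLAIM (what is proved, stated in full; the proofs are below) =====
def Claim_equal_fix_code_block_spacing_py : Prop := ∀ (content : String), Dom_fix_code_block_spacing_py content → Spec_fix_code_block_spacing_py content (fix_code_block_spacing_py content)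

-- ===== LEMMAS AND PROOFS =====

-- one-step unfolding equations for A's loop on a fence line / a plain line
theorem fixLoopA_fence_false {line : String} (rest : List String) (i : Nat) (acc : List String)
    (hs : PySem.Str.startswith line "```" = true) :
    fixLoopA i (line :: rest) acc false
      = fixLoopA (i + 1) rest
          ((if 0 < i ∧ acc ≠ [] ∧ PySem.Str.strip (acc.getLastD "") ≠ "" then acc ++ [""] else acc) ++ [line]) true := by
  simp only [fixLoopA, hs, Bool.not_false, if_true]

theorem fixLoopA_fence_true {line : String} (rest : List String) (i : Nat) (acc : List String)
    (hs : PySem.Str.startswith line "```" = true) :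
    fixLoopA i (line :: rest) acc true
      = fixLoopA (i + 1) rest
          (if nextNonblankA rest then (acc ++ [line]) ++ [""] else acc ++ [line]) false := by
  simp only [fixLoopA, hs, Bool.not_true, Bool.false_eq_true, if_false, if_true]

theorem fixLoopA_plain {line : String} (rest : List String) (i : Nat) (acc : List String) (b : Bool)
    (hs : ¬ PySem.Str.startswith line "```" = true) :
    fixLoopA i (line :: rest) acc b = fixLoopA (i + 1) rest (acc ++ [line]) b := by
  simp only [fixLoopA, hs, if_false, Bool.false_eq_true]

theorem classifyB_fence {line : String} (rest : List String) (o : Bool)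
    (hs : PySem.Str.startswith line "```" = true) :
    classifyB (line :: rest) o
      = (if o then FenceRole.fopen else FenceRole.fclose) :: classifyB rest (!o) := by
  simp only [classifyB, hs, if_true]

theorem classifyB_plain {line : String} (rest : List String) (o : Bool)
    (hs : ¬ PySem.Str.startswith line "```" = true) :
    classifyB (line :: rest) o = FenceRole.plain :: classifyB rest o := by
  simp only [classifyB, hs, if_false, Bool.false_eq_true]

-- the lookahead at the next source line is unchanged by zipping with the roles
theorem nextCond_zip (rest : List String) (o : Bool) :
    nextNonblankA rest = nextNonblankB (rest.zip (classifyB rest o)) := by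
  cases rest with
  | nil => rfl
  | cons x xs =>
    show _ = nextNonblankB ((x :: xs).zip (classifyB (x :: xs) o))
    unfold classifyB
    split_ifs <;> rfl

-- A's loop equals B's emit over the classified lines, provided a nonempty output implies i > 0
-- (this squares A's 'i > 0 and fixed_lines' guard with B's 'out' guard; A's in_code_block is the
-- negation of B's open_fence parity flag).
theorem fixLoopA_eq_emitB (ls : List String) :
    ∀ (i : Nat) (acc : List String) (b : Bool),
      (acc ≠ [] → 0 < i) →
      fixLoopA i ls acc b = emitB (ls.zip (classifyB ls (!b))) acc := by
  induction ls with
  | nil => intro i acc b _; simp [fixLoopA, emitB]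
  | cons line rest ih =>
    intro i acc b h
    by_cases hs : PySem.Str.startswith line "```" = true
    · cases b with
      | false =>
        rw [fixLoopA_fence_false rest i acc hs, Bool.not_false, classifyB_fence rest true hs,
            List.zip_cons_cons]
        simp only [if_true]
        rw [show emitB ((line, FenceRole.fopen) :: rest.zip (classifyB rest (!true))) acc
            = emitB (rest.zip (classifyB rest (!true)))
                ((if acc ≠ [] ∧ PySem.Str.strip (acc.getLastD "") ≠ "" then acc ++ [""] else acc) ++ [line])
            from rfl]
        have hcond : (0 < i ∧ acc ≠ [] ∧ PySem.Str.strip (acc.getLastD "") ≠ "")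
            ↔ (acc ≠ [] ∧ PySem.Str.strip (acc.getLastD "") ≠ "") :=
          ⟨fun ⟨_, h2, h3⟩ => ⟨h2, h3⟩, fun ⟨h2, h3⟩ => ⟨h h2, h2, h3⟩⟩
        rw [if_congr hcond rfl rfl]
        exact ih (i + 1) _ true (fun _ => Nat.succ_pos i)
      | true =>
        rw [fixLoopA_fence_true rest i acc hs, Bool.not_true, classifyB_fence rest false hs,
            List.zip_cons_cons]
        simp only [Bool.false_eq_true, if_false]
        rw [show emitB ((line, FenceRole.fclose) :: rest.zip (classifyB rest (!false))) acc
            = emitB (rest.zip (classifyB rest (!false)))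
                (if nextNonblankB (rest.zip (classifyB rest (!false))) then (acc ++ [line]) ++ [""] else acc ++ [line])
            from rfl]
        rw [nextCond_zip rest (!false)]
        exact ih (i + 1) _ false (fun _ => Nat.succ_pos i)
    · rw [fixLoopA_plain rest i acc b hs, classifyB_plain rest (!b) hs, List.zip_cons_cons]
      rw [show emitB ((line, FenceRole.plain) :: rest.zip (classifyB rest (!b))) acc
          = emitB (rest.zip (classifyB rest (!b))) (acc ++ [line]) from rfl]
      exact ih (i + 1) (acc ++ [line]) b (fun _ => Nat.succ_pos i)

-- ===== VERDICT (by name: the statement is the Claim_ definition above) =====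
theorem fix_code_block_spacing_py_spec : Claim_equal_fix_code_block_spacing_py := by
  intro content _
  unfold Spec_fix_code_block_spacing_py fix_code_block_spacing_py fix_code_block_spacing_py_alt
  rw [fixLoopA_eq_emitB _ 0 [] false (fun hc => absurd rfl hc), Bool.not_false]
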